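-- pv_equiv track=rewrite | github.com/MasterSpam/Informatik_1_HS2022 | Woche_12_new_ACCESS/Task_12_1_script_Make_it_Simple.py | find_in
-- ===== SOURCE A (Python) =====
-- def find_in(pairs):
--     if not pairs:
--         return None
--     a = []
--     b = pairs
--     while len(b) > 1:
--         for i in range(len(b)):
--             if i == len(b)-1:
--                 break
--             if b[i][1] < b[i+1][1]:
--                 a.append(b[i])
--             else:
--                 a.append(b[i+1])
--         if len(a) == 1:
--             return a[0][0]
--         b = a
--         a = []
--     return b[0][0]
-- ===== SOURCE B (Python) =====
-- def find_in(pairs):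
--     if not pairs:
--         return None
--     best = pairs[0]
--     for p in pairs[1:]:
--         if p[1] <= best[1]:
--             best = p
--     return best[0]
-- ===== Notes on version B (the rewrite author's own statement) =====
-- stated objective: faster
-- what changed: Replaces A's quadratic tournament of repeated adjacent-pair minimum rounds with a single linear pass tracking the rightmost minimum-second-value pair (update on <=).
import Mathlib
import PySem

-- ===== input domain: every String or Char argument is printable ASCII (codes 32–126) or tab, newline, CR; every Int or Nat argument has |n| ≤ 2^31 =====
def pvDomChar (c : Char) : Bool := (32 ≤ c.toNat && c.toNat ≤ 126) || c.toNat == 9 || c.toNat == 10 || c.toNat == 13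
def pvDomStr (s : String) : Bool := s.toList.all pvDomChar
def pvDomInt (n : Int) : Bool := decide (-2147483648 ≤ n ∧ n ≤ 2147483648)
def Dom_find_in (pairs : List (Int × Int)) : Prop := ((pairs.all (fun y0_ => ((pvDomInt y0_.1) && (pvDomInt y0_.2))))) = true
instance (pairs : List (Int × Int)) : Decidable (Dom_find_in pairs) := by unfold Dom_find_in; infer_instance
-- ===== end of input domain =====

-- B replaces A's quadratic tournament of adjacent-pair minimum rounds by one linear pass
-- tracking the rightmost pair with minimum second component (objective: faster).

-- ===== PORT A =====
-- min of b[i], b[i+1] by second component, tie to the right (A's inner comparison, branch order kept)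
def pvF (x y : Int × Int) : Int × Int := if x.2 < y.2 then x else y

-- the inner 'for i in range(len(b))' loop: append min(b[i], b[i+1]) for i = 0 .. len(b)-2
def pvRound (b : List (Int × Int)) : List (Int × Int) :=
  match b with
  | x :: y :: rest => pvF x y :: pvRound (y :: rest)
  | _ => []

theorem pvRound_length (b : List (Int × Int)) : (pvRound b).length = b.length - 1 := by
  induction b with
  | nil => simp [pvRound]
  | cons x xs ih =>
    cases xs with
    | nil => simp [pvRound]
    | cons y rest => simp [pvRound] at ih ⊢; omega

-- the 'while len(b) > 1' loop of A; terminates since each round shortens b by one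
def pvLoop (b : List (Int × Int)) : Option Int :=
  if _h : b.length > 1 then
    let a := pvRound b
    if a.length = 1 then (a.head?.map Prod.fst)
    else pvLoop a
  else b.head?.map Prod.fst
termination_by b.length
decreasing_by
  have := pvRound_length b; omega

def find_in (pairs : List (Int × Int)) : Option Int :=
  if pairs = [] then none
  else pvLoop pairs

-- ===== PORT B =====
def find_in_alt (pairs : List (Int × Int)) : Option Int :=
  match pairs with
  | [] => none
  | p :: rest =>
      some ((rest.foldl (fun best q => if q.2 ≤ best.2 then q else best) p).1)

-- ===== PRECONDITION & SPEC =====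
def Spec_find_in (pairs : List (Int × Int)) (out : Option Int) : Prop := out = find_in_alt pairs
instance (pairs : List (Int × Int)) (out : Option Int) : Decidable (Spec_find_in pairs out) := by unfold Spec_find_in; infer_instance

-- ===== CLAIM (what is proved, stated in full; the proofs are below) =====
def Claim_equal_find_in : Prop := ∀ (pairs : List (Int × Int)), Dom_find_in pairs → Spec_find_in pairs (find_in pairs)

-- ===== LEMMAS AND PROOFS =====

theorem pvF_eq_B : (fun best q : Int × Int => if q.2 ≤ best.2 then q else best) = pvF := by
  funext x y
  unfold pvF
  split_ifs <;> first | rfl | omega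

theorem pvF_assoc (x y z : Int × Int) : pvF (pvF x y) z = pvF x (pvF y z) := by
  unfold pvF
  split_ifs <;> first | rfl | omega

theorem foldl_pvF_assoc (ws : List (Int × Int)) (a b : Int × Int) :
    ws.foldl pvF (pvF a b) = pvF a (ws.foldl pvF b) := by
  induction ws generalizing b with
  | nil => rfl
  | cons w ws ih => simp only [List.foldl_cons, pvF_assoc, ih]

theorem foldl_pvF_snd_le (rest : List (Int × Int)) (y : Int × Int) :
    (rest.foldl pvF y).2 ≤ y.2 := by
  induction rest generalizing y with
  | nil => simp
  | cons z rs ih =>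
    simp only [List.foldl_cons]
    have h := ih (pvF y z)
    have : (pvF y z).2 ≤ y.2 := by unfold pvF; split_ifs <;> omega
    omega

theorem pvF_self_fold (rest : List (Int × Int)) (y : Int × Int) :
    pvF y (rest.foldl pvF y) = rest.foldl pvF y := by
  have h := foldl_pvF_snd_le rest y
  rw [pvF]
  split_ifs with hc
  · omega
  · rfl

-- folding over one tournament round, seeded with x, is pvF x (rightmost argmin)
theorem foldl_round (rs : List (Int × Int)) (z x : Int × Int) (h : rs ≠ []) :
    (pvRound (z :: rs)).foldl pvF x = pvF x (rs.foldl pvF z) := by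
  induction rs generalizing z x with
  | nil => exact absurd rfl h
  | cons w ws ih =>
    cases ws with
    | nil => simp [pvRound]
    | cons v vs =>
      show (pvRound (v :: vs)).foldl pvF (pvF (pvF x (pvF z w)) (pvF w v)) = _
      have step : pvRound (v :: vs) = pvRound (w :: v :: vs).tail := rfl
      rw [show (pvRound (v :: vs)).foldl pvF (pvF (pvF x (pvF z w)) (pvF w v)) =
            (pvRound (w :: (v :: vs))).foldl pvF (pvF x (pvF z w)) from rfl]
      rw [ih w (pvF x (pvF z w)) (by simp)]
      rw [pvF_assoc]
      rw [show (w :: v :: vs).foldl pvF z = (v :: vs).foldl pvF (pvF z w) from rfl]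
      rw [foldl_pvF_assoc]
      rw [pvF_assoc, pvF_self_fold]

-- one tournament round preserves the rightmost argmin
theorem round_amin (x y : Int × Int) (rest : List (Int × Int)) :
    (pvRound (y :: rest)).foldl pvF (pvF x y) = (y :: rest).foldl pvF x := by
  cases rest with
  | nil => simp [pvRound]
  | cons z rs =>
    rw [foldl_round (z :: rs) y (pvF x y) (by simp)]
    rw [pvF_assoc, pvF_self_fold]
    rw [show (y :: z :: rs).foldl pvF x = (z :: rs).foldl pvF (pvF x y) from rfl]
    rw [foldl_pvF_assoc]

theorem pvLoop_eq (n : ℕ) : ∀ (b : List (Int × Int)), b.length = n → b ≠ [] →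
    pvLoop b = some ((b.tail.foldl pvF (b.headI)).1) := by
  induction n using Nat.strong_induction_on with
  | _ n ih =>
    intro b hn hne
    match b with
    | [] => exact absurd rfl hne
    | [x] => rw [pvLoop]; simp
    | x :: y :: rest =>
      rw [pvLoop]
      rw [dif_pos (by simp : (x :: y :: rest).length > 1)]
      have hR : pvRound (x :: y :: rest) = pvF x y :: pvRound (y :: rest) := rfl
      by_cases hrest : rest = []
      · subst hrest
        simp [pvRound]
      · have hrl : 1 ≤ rest.length := List.length_pos_iff.mpr hrest
        have hlen : (pvRound (x :: y :: rest)).length = rest.length + 1 := by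
          rw [pvRound_length]; simp
        rw [if_neg (by omega)]
        have hn2 : n = rest.length + 2 := by rw [← hn]; simp
        rw [ih (rest.length + 1) (by omega) (pvRound (x :: y :: rest)) hlen
              (by rw [hR]; simp)]
        rw [hR]
        simp only [List.tail_cons, List.headI_cons]
        rw [round_amin]

-- ===== VERDICT (by name: the statement is the Claim_ definition above) =====
theorem find_in_spec : Claim_equal_find_in := by
  intro pairs _
  unfold Spec_find_in find_in find_in_alt
  match pairs with
  | [] => simp
  | p :: rest =>
    rw [if_neg (by simp)]
    rw [pvLoop_eq (p :: rest).length (p :: rest) rfl (by simp)]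
    simp [pvF_eq_B]
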